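-- pv_equiv track=rewrite | github.com/platanus-hack/platanus-hack-25-team-12 | backend/marketplace_agents.py | find_product_match
-- ===== SOURCE A (Python) =====
-- from typing import Optional, List
--
-- MARKET_PRICE_RANGES = {
--     # Electronics - Phones
--     "iphone 15 pro max": (900, 1400),
--     "iphone 15 pro": (800, 1200),
--     "iphone 15": (600, 1000),
--     "iphone 14 pro max": (700, 1100),
--     "iphone 14 pro": (600, 1000),
--     "iphone 14": (500, 800),
--     "iphone 13": (400, 700),
--     "iphone 12": (300, 500),
--     "iphone 11": (200, 400),
--     "samsung galaxy s24": (600, 1000),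
--     "samsung galaxy s23": (500, 900),
--     "samsung galaxy s22": (400, 700),
--
--     # Electronics - Computers
--     "macbook pro 16": (1500, 3500),
--     "macbook pro 14": (1200, 3000),
--     "macbook pro 13": (800, 2000),
--     "macbook air m2": (800, 1500),
--     "macbook air m1": (600, 1200),
--     "macbook air": (500, 1500),
--     "imac": (800, 2500),
--     "ipad pro": (500, 1500),
--     "ipad air": (400, 900),
--     "ipad": (250, 600),
--
--     # Gaming
--     "ps5": (350, 600),
--     "playstation 5": (350, 600),
--     "xbox series x": (350, 550),
--     "xbox series s": (200, 350),
--     "nintendo switch oled": (280, 400),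
--     "nintendo switch": (200, 350),
--     "steam deck": (350, 700),
--
--     # Graphics Cards
--     "rtx 4090": (1500, 2500),
--     "rtx 4080": (900, 1500),
--     "rtx 4070": (500, 800),
--     "rtx 3080": (400, 800),
--     "rtx 3070": (300, 600),
--     "rtx 3060": (200, 400),
--
--     # Other
--     "airpods pro": (150, 280),
--     "airpods max": (350, 600),
--     "apple watch ultra": (500, 900),
--     "apple watch series 9": (300, 500),
--     "apple watch": (150, 500),
-- }
--
-- def find_product_match(title: str) -> Optional[tuple]:
--     """Find matching product in price database and return (product_name, min_price, max_price)."""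
--     title_lower = title.lower()
--
--     # Sort by key length (longest first) to match more specific products first
--     sorted_products = sorted(MARKET_PRICE_RANGES.keys(), key=len, reverse=True)
--
--     for product in sorted_products:
--         if product in title_lower:
--             min_price, max_price = MARKET_PRICE_RANGES[product]
--             return (product, min_price, max_price)
--
--     return None
-- ===== SOURCE B (Python) =====
-- # Flat catalogue of (product, min_price, max_price); order = the original dict's
-- # insertion order, which drives the tie-break among equal-length matches.
-- PRODUCT_PRICES = [
--     ("iphone 15 pro max", 900, 1400),
--     ("iphone 15 pro", 800, 1200),
--     ("iphone 15", 600, 1000),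
--     ("iphone 14 pro max", 700, 1100),
--     ("iphone 14 pro", 600, 1000),
--     ("iphone 14", 500, 800),
--     ("iphone 13", 400, 700),
--     ("iphone 12", 300, 500),
--     ("iphone 11", 200, 400),
--     ("samsung galaxy s24", 600, 1000),
--     ("samsung galaxy s23", 500, 900),
--     ("samsung galaxy s22", 400, 700),
--     ("macbook pro 16", 1500, 3500),
--     ("macbook pro 14", 1200, 3000),
--     ("macbook pro 13", 800, 2000),
--     ("macbook air m2", 800, 1500),
--     ("macbook air m1", 600, 1200),
--     ("macbook air", 500, 1500),
--     ("imac", 800, 2500),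
--     ("ipad pro", 500, 1500),
--     ("ipad air", 400, 900),
--     ("ipad", 250, 600),
--     ("ps5", 350, 600),
--     ("playstation 5", 350, 600),
--     ("xbox series x", 350, 550),
--     ("xbox series s", 200, 350),
--     ("nintendo switch oled", 280, 400),
--     ("nintendo switch", 200, 350),
--     ("steam deck", 350, 700),
--     ("rtx 4090", 1500, 2500),
--     ("rtx 4080", 900, 1500),
--     ("rtx 4070", 500, 800),
--     ("rtx 3080", 400, 800),
--     ("rtx 3070", 300, 600),
--     ("rtx 3060", 200, 400),
--     ("airpods pro", 150, 280),
--     ("airpods max", 350, 600),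
--     ("apple watch ultra", 500, 900),
--     ("apple watch series 9", 300, 500),
--     ("apple watch", 150, 500),
-- ]
--
--
-- def find_product_match(title):
--     """No sort, no dict: filter the flat catalogue to the entries whose name is
--     a substring of the lowered title, then take the longest one with max(key=len)
--     (Python's max keeps the FIRST maximal entry, which reproduces the tie-break
--     of A's stable length-descending sort)."""
--     title_lower = title.lower()
--     matches = [entry for entry in PRODUCT_PRICES if entry[0] in title_lower]
--     if not matches:
--         return None
--     return max(matches, key=lambda entry: len(entry[0]))
-- ===== Notes on version B (the rewrite author's own statement) =====
-- stated objective: simpler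
-- what changed: Replaces A's sort-all-dict-keys-then-return-first-substring-match with filter-then-max over a flat (product, min, max) triple list: collect the matching entries and take max(matches, key=len) (first maximal, so length ties keep the earlier entry exactly like A's stable sort), with no sort and no dict lookup.
import Mathlib
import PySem

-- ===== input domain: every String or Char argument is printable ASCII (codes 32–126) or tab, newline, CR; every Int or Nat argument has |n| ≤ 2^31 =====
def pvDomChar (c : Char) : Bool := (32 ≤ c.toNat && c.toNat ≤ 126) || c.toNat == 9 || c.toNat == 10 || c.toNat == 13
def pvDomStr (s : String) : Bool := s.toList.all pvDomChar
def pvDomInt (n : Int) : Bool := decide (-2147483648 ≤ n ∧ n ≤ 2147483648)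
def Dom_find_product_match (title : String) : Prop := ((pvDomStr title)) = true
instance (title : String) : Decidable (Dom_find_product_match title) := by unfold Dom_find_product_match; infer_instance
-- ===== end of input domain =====

-- B replaces A's sort-the-dict-keys-then-take-first-substring-match with filter-then-max over a
-- flat triple list (max keeps the first maximal entry, matching the stable sort's tie-break):
-- simpler, no sort and no dict lookup.

-- ===== PORT A =====
-- the module-level dict MARKET_PRICE_RANGES
def pvMPR : PySem.Dict String (Int × Int) := PySem.Dict.ofList [
  ("iphone 15 pro max", (900, 1400)),
  ("iphone 15 pro", (800, 1200)),
  ("iphone 15", (600, 1000)),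
  ("iphone 14 pro max", (700, 1100)),
  ("iphone 14 pro", (600, 1000)),
  ("iphone 14", (500, 800)),
  ("iphone 13", (400, 700)),
  ("iphone 12", (300, 500)),
  ("iphone 11", (200, 400)),
  ("samsung galaxy s24", (600, 1000)),
  ("samsung galaxy s23", (500, 900)),
  ("samsung galaxy s22", (400, 700)),
  ("macbook pro 16", (1500, 3500)),
  ("macbook pro 14", (1200, 3000)),
  ("macbook pro 13", (800, 2000)),
  ("macbook air m2", (800, 1500)),
  ("macbook air m1", (600, 1200)),
  ("macbook air", (500, 1500)),
  ("imac", (800, 2500)),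
  ("ipad pro", (500, 1500)),
  ("ipad air", (400, 900)),
  ("ipad", (250, 600)),
  ("ps5", (350, 600)),
  ("playstation 5", (350, 600)),
  ("xbox series x", (350, 550)),
  ("xbox series s", (200, 350)),
  ("nintendo switch oled", (280, 400)),
  ("nintendo switch", (200, 350)),
  ("steam deck", (350, 700)),
  ("rtx 4090", (1500, 2500)),
  ("rtx 4080", (900, 1500)),
  ("rtx 4070", (500, 800)),
  ("rtx 3080", (400, 800)),
  ("rtx 3070", (300, 600)),
  ("rtx 3060", (200, 400)),
  ("airpods pro", (150, 280)),
  ("airpods max", (350, 600)),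
  ("apple watch ultra", (500, 900)),
  ("apple watch series 9", (300, 500)),
  ("apple watch", (150, 500))]

-- A's 'for product in sorted_products: if product in title_lower: return …'
def pvLoopA (tl : String) : List String → Option (String × Int × Int)
  | [] => none
  | p :: ps =>
    if PySem.Str.isIn p tl then
      -- MARKET_PRICE_RANGES[product]; the key always comes from the dict's own keys,
      -- so the KeyError branch (none) is unreachable
      match pvMPR.get? p with
      | some v => some (p, v)
      | none => none
    else pvLoopA tl ps

def find_product_match (title : String) : Option (String × Int × Int) :=
  let title_lower := PySem.Str.lower title
  let sorted_products := PySem.List.sorted pvMPR.keys PySem.Str.len true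
  pvLoopA title_lower sorted_products

-- ===== PORT B =====
-- Source B's module-level flat catalogue PRODUCT_PRICES
def pvProducts : List (String × Int × Int) := [
  ("iphone 15 pro max", 900, 1400),
  ("iphone 15 pro", 800, 1200),
  ("iphone 15", 600, 1000),
  ("iphone 14 pro max", 700, 1100),
  ("iphone 14 pro", 600, 1000),
  ("iphone 14", 500, 800),
  ("iphone 13", 400, 700),
  ("iphone 12", 300, 500),
  ("iphone 11", 200, 400),
  ("samsung galaxy s24", 600, 1000),
  ("samsung galaxy s23", 500, 900),
  ("samsung galaxy s22", 400, 700),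
  ("macbook pro 16", 1500, 3500),
  ("macbook pro 14", 1200, 3000),
  ("macbook pro 13", 800, 2000),
  ("macbook air m2", 800, 1500),
  ("macbook air m1", 600, 1200),
  ("macbook air", 500, 1500),
  ("imac", 800, 2500),
  ("ipad pro", 500, 1500),
  ("ipad air", 400, 900),
  ("ipad", 250, 600),
  ("ps5", 350, 600),
  ("playstation 5", 350, 600),
  ("xbox series x", 350, 550),
  ("xbox series s", 200, 350),
  ("nintendo switch oled", 280, 400),
  ("nintendo switch", 200, 350),
  ("steam deck", 350, 700),
  ("rtx 4090", 1500, 2500),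
  ("rtx 4080", 900, 1500),
  ("rtx 4070", 500, 800),
  ("rtx 3080", 400, 800),
  ("rtx 3070", 300, 600),
  ("rtx 3060", 200, 400),
  ("airpods pro", 150, 280),
  ("airpods max", 350, 600),
  ("apple watch ultra", 500, 900),
  ("apple watch series 9", 300, 500),
  ("apple watch", 150, 500)]

-- Source B: filter the catalogue, then max(matches, key=len of the name);
-- PySem.List.max? is Python's max-with-key (first maximal) and is none exactly
-- on the empty list, which is Source B's explicit 'if not matches: return None'
def find_product_match_alt (title : String) : Option (String × Int × Int) :=
  let title_lower := PySem.Str.lower title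
  let found := pvProducts.filter (fun entry => PySem.Str.isIn entry.1 title_lower)
  PySem.List.max? found (fun entry => PySem.Str.len entry.1)

-- ===== PRECONDITION & SPEC =====
def Spec_find_product_match (title : String) (out : Option (String × Int × Int)) : Prop := out = find_product_match_alt title
instance (title : String) (out : Option (String × Int × Int)) : Decidable (Spec_find_product_match title out) := by unfold Spec_find_product_match; infer_instance

-- ===== CLAIM (what is proved, stated in full; the proofs are below) =====
def Claim_equal_find_product_match : Prop := ∀ (title : String), Dom_find_product_match title → Spec_find_product_match title (find_product_match title)

-- ===== LEMMAS AND PROOFS =====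

-- the running max step of max?, named so the lemmas below can be stated once
def pvStep (acc : Option (String × Int × Int)) (x : String × Int × Int) :
    Option (String × Int × Int) :=
  match acc with
  | none => some x
  | some m => if PySem.Str.len m.1 < PySem.Str.len x.1 then some x else some m

-- max? with key 'name length' IS the running-max fold with pvStep
lemma pvMax_eq_foldl (L : List (String × Int × Int)) :
    PySem.List.max? L (fun entry => PySem.Str.len entry.1) = L.foldl pvStep none := by
  unfold PySem.List.max?
  exact List.foldl_ext _ _ none (fun acc x _ => by cases acc <;> rfl)

-- the running-max accumulator is its start or one of the traversed entries
lemma pvMaxFold_shape :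
    ∀ (L : List (String × Int × Int)) (acc : Option (String × Int × Int)),
      L.foldl pvStep acc = acc ∨ ∃ t ∈ L, L.foldl pvStep acc = some t := by
  intro L
  induction L with
  | nil => intro acc; left; rfl
  | cons x L ih =>
    intro acc
    simp only [List.foldl_cons]
    rcases ih (pvStep acc x) with h | ⟨t, htL, ht⟩
    · rw [h]
      cases acc with
      | none => right; exact ⟨x, by simp, rfl⟩
      | some m =>
        by_cases hc : PySem.Str.len m.1 < PySem.Str.len x.1
        · right; exact ⟨x, by simp, by simp only [pvStep]; rw [if_pos hc]⟩
        · left; simp only [pvStep]; rw [if_neg hc]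
    · right; exact ⟨t, by simp [htL], ht⟩

-- nothing of length at most the current max ever replaces it
lemma pvMaxFold_stay (b : String × Int × Int) :
    ∀ (L : List (String × Int × Int)),
      (∀ t ∈ L, PySem.Str.len t.1 ≤ PySem.Str.len b.1) →
      L.foldl pvStep (some b) = some b := by
  intro L
  induction L with
  | nil => intro _; rfl
  | cons x L ih =>
    intro h
    have hx := h x (by simp)
    simp only [List.foldl_cons, pvStep, if_neg (not_lt.mpr hx)]
    exact ih (fun t ht => h t (by simp [ht]))

-- max-with-key over A ++ t :: B picks t when A is strictly shorter and B no longer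
lemma pvMax_pick (t : String × Int × Int) (A B : List (String × Int × Int))
    (hA : ∀ x ∈ A, PySem.Str.len x.1 < PySem.Str.len t.1)
    (hB : ∀ x ∈ B, PySem.Str.len x.1 ≤ PySem.Str.len t.1) :
    PySem.List.max? (A ++ t :: B) (fun entry => PySem.Str.len entry.1) = some t := by
  rw [pvMax_eq_foldl, List.foldl_append]
  rcases pvMaxFold_shape A none with h | ⟨x, hxA, h⟩
  · rw [h]
    simp only [List.foldl_cons, pvStep]
    exact pvMaxFold_stay t B hB
  · rw [h]
    simp only [List.foldl_cons, pvStep, if_pos (hA x hxA)]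
    exact pvMaxFold_stay t B hB

-- main lemma: first match in a stable length-descending ordering of the names
-- equals max-by-name-length (first maximal) of the filtered entry list
lemma pvMain (tl : String) :
    ∀ (S : List String) (L : List (String × Int × Int)),
      S.Perm (L.map (·.1)) →
      S.Pairwise (fun a b => PySem.Str.len b ≤ PySem.Str.len a) →
      (∀ n : Int, S.filter (fun x => PySem.Str.len x == n)
        = (L.map (·.1)).filter (fun x => PySem.Str.len x == n)) →
      (∀ t ∈ L, pvMPR.get? t.1 = some t.2) →
      (L.map (·.1)).Nodup →
      pvLoopA tl S
        = PySem.List.max? (L.filter (fun entry => PySem.Str.isIn entry.1 tl))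
            (fun entry => PySem.Str.len entry.1) := by
  intro S
  induction S with
  | nil =>
    intro L hperm _ _ _ _
    have hmap : L.map (·.1) = [] := hperm.symm.eq_nil
    have hL : L = [] := List.map_eq_nil_iff.mp hmap
    subst hL; rfl
  | cons m S' ih =>
    intro L hperm hpair hstable hget hnodup
    have hmS : m ∈ L.map (·.1) := hperm.mem_iff.mp (by simp)
    obtain ⟨t, htL, htm⟩ := List.mem_map.mp hmS
    subst htm
    obtain ⟨L1, L2, hL⟩ := List.append_of_mem htL
    subst hL
    have hmapL : (L1 ++ t :: L2).map (·.1) = L1.map (·.1) ++ t.1 :: L2.map (·.1) := by simp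
    rw [hmapL] at hperm hstable hnodup
    have hnd : (t.1 :: (L1.map (·.1) ++ L2.map (·.1))).Nodup := List.nodup_middle.mp hnodup
    have hm_not : t.1 ∉ L1.map (·.1) ∧ t.1 ∉ L2.map (·.1) := by
      have h1 := (List.nodup_cons.mp hnd).1
      constructor
      · exact fun h => h1 (List.mem_append_left _ h)
      · exact fun h => h1 (List.mem_append_right _ h)
    obtain ⟨hm, hpair'⟩ := List.pairwise_cons.mp hpair
    have hperm' : S'.Perm (L1.map (·.1) ++ L2.map (·.1)) :=
      (hperm.trans List.perm_middle).cons_inv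
    have hmemS' : ∀ y, y ∈ L1.map (·.1) ++ L2.map (·.1) → y ∈ S' :=
      fun y hy => hperm'.mem_iff.mpr hy
    -- every entry before t has a strictly shorter name
    have hA : ∀ x ∈ L1, PySem.Str.len x.1 < PySem.Str.len t.1 := by
      intro x hx
      have hx1 : x.1 ∈ L1.map (·.1) := List.mem_map_of_mem hx
      have hxS' : x.1 ∈ S' := hmemS' _ (List.mem_append_left _ hx1)
      refine lt_of_le_of_ne (hm _ hxS') (fun heq => ?_)
      have hst := hstable (PySem.Str.len t.1)
      rw [List.filter_cons_of_pos (by simp), List.filter_append,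
          List.filter_cons_of_pos (by simp)] at hst
      have hxf : x.1 ∈ (L1.map (·.1)).filter (fun y => PySem.Str.len y == PySem.Str.len t.1) :=
        List.mem_filter.mpr ⟨hx1, by simp only [beq_iff_eq]; exact heq⟩
      cases hf : (L1.map (·.1)).filter (fun y => PySem.Str.len y == PySem.Str.len t.1) with
      | nil => rw [hf] at hxf; exact absurd hxf (List.not_mem_nil)
      | cons b B =>
        rw [hf] at hst
        have hb : t.1 = b := (List.cons_eq_cons.mp hst).1
        have hbL1 : b ∈ L1.map (·.1) := (List.mem_filter.mp (hf ▸ List.mem_cons_self ..)).1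
        exact hm_not.1 (hb ▸ hbL1)
    -- every entry after t has a name at most as long
    have hB : ∀ x ∈ L2, PySem.Str.len x.1 ≤ PySem.Str.len t.1 := by
      intro x hx
      have hxS' : x.1 ∈ S' := hmemS' _ (List.mem_append_right _ (List.mem_map_of_mem hx))
      exact hm _ hxS'
    -- stability descends to S', L1 ++ L2
    have hstable' : ∀ n : Int, S'.filter (fun x => PySem.Str.len x == n)
        = ((L1 ++ L2).map (·.1)).filter (fun x => PySem.Str.len x == n) := by
      intro n
      have hst := hstable n
      rw [List.filter_append] at hst
      rw [List.map_append, List.filter_append]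
      by_cases hn : PySem.Str.len t.1 = n
      · have hp : (fun x => PySem.Str.len x == n) t.1 = true := by
          simp only [beq_iff_eq]; exact hn
        rw [List.filter_cons_of_pos (p := fun x => PySem.Str.len x == n) hp, List.filter_cons_of_pos (p := fun x => PySem.Str.len x == n) hp] at hst
        have h1nil : (L1.map (·.1)).filter (fun x => PySem.Str.len x == n) = [] := by
          rw [List.filter_eq_nil_iff]
          intro y hy
          obtain ⟨x, hx, hxy⟩ := List.mem_map.mp hy
          have := hA x hx
          simp only [beq_iff_eq]
          rw [← hxy]; omega
        rw [h1nil] at hst ⊢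
        rw [List.nil_append] at hst ⊢
        exact (List.cons_eq_cons.mp hst).2
      · have hp : ¬ (fun x => PySem.Str.len x == n) t.1 = true := by
          simp only [beq_iff_eq]; exact hn
        rw [List.filter_cons_of_neg (p := fun x => PySem.Str.len x == n) hp, List.filter_cons_of_neg (p := fun x => PySem.Str.len x == n) hp] at hst
        exact hst
    have hget' : ∀ x ∈ L1 ++ L2, pvMPR.get? x.1 = some x.2 := by
      intro x hx
      rcases List.mem_append.mp hx with h | h
      · exact hget x (by simp [h])
      · exact hget x (by simp [h])
    have hnodup' : ((L1 ++ L2).map (·.1)).Nodup := by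
      rw [List.map_append]; exact (List.nodup_cons.mp hnd).2
    have hih := ih (L1 ++ L2) (by rw [List.map_append]; exact hperm') hpair' hstable' hget' hnodup'
    -- compare one step of A's scan with filter-then-max through L1, t, L2
    have hgt := hget t (by simp)
    simp only [pvLoopA]
    cases hP : PySem.Str.isIn t.1 tl with
    | false =>
      rw [if_neg (by simp [hP])]
      have hfil : (L1 ++ t :: L2).filter (fun entry => PySem.Str.isIn entry.1 tl)
          = (L1 ++ L2).filter (fun entry => PySem.Str.isIn entry.1 tl) := by
        rw [List.filter_append, List.filter_append,
            List.filter_cons_of_neg (by simpa using hP)]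
      rw [hfil]
      exact hih
    | true =>
      rw [if_pos (by simp [hP]), hgt]
      have hfil : (L1 ++ t :: L2).filter (fun entry => PySem.Str.isIn entry.1 tl)
          = L1.filter (fun entry => PySem.Str.isIn entry.1 tl)
            ++ t :: L2.filter (fun entry => PySem.Str.isIn entry.1 tl) := by
        rw [List.filter_append, List.filter_cons_of_pos (by simpa using hP)]
      rw [hfil, pvMax_pick t _ _
        (fun x hx => hA x (List.mem_filter.mp hx).1)
        (fun x hx => hB x (List.mem_filter.mp hx).1)]

-- literal value of the sorted key list / the name list, used to finitize the stability check
def pvSortedKeys : List String := ["nintendo switch oled", "apple watch series 9", "samsung galaxy s24", "samsung galaxy s23", "samsung galaxy s22", "iphone 15 pro max", "iphone 14 pro max", "apple watch ultra", "nintendo switch", "macbook pro 16", "macbook pro 14", "macbook pro 13", "macbook air m2", "macbook air m1", "iphone 15 pro", "iphone 14 pro", "playstation 5", "xbox series x", "xbox series s", "macbook air", "airpods pro", "airpods max", "apple watch", "steam deck", "iphone 15", "iphone 14", "iphone 13", "iphone 12", "iphone 11", "ipad pro", "ipad air", "rtx 4090", "rtx 4080", "rtx 4070", "rtx 3080", "rtx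 3070", "rtx 3060", "imac", "ipad", "ps5"]

def pvKeysList : List String := ["iphone 15 pro max", "iphone 15 pro", "iphone 15", "iphone 14 pro max", "iphone 14 pro", "iphone 14", "iphone 13", "iphone 12", "iphone 11", "samsung galaxy s24", "samsung galaxy s23", "samsung galaxy s22", "macbook pro 16", "macbook pro 14", "macbook pro 13", "macbook air m2", "macbook air m1", "macbook air", "imac", "ipad pro", "ipad air", "ipad", "ps5", "playstation 5", "xbox series x", "xbox series s", "nintendo switch oled", "nintendo switch", "steam deck", "rtx 4090", "rtx 4080", "rtx 4070", "rtx 3080", "rtx 3070", "rtx 3060", "airpods pro", "airpods max", "apple watch ultra", "apple watch series 9", "apple watch"]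

-- ===== VERDICT (by name: the statement is the Claim_ definition above) =====
set_option maxRecDepth 100000 in
theorem find_product_match_spec : Claim_equal_find_product_match := by
  intro title _
  unfold Spec_find_product_match find_product_match find_product_match_alt
  apply pvMain
  · exact PySem.List.sorted_perm ..
  · exact PySem.List.sorted_pairwise_rev ..
  · have hS : PySem.List.sorted pvMPR.keys PySem.Str.len true = pvSortedKeys := by decide
    have hI : pvProducts.map (·.1) = pvKeysList := by decide
    rw [hS, hI]
    intro n
    by_cases hn : 3 ≤ n ∧ n ≤ 20
    · obtain ⟨h1, h2⟩ := hn
      interval_cases n <;> decide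
    · have hnil : ∀ (l : List String),
          (∀ x ∈ l, 3 ≤ PySem.Str.len x ∧ PySem.Str.len x ≤ 20) →
          l.filter (fun x => PySem.Str.len x == n) = [] := by
        intro l hl
        rw [List.filter_eq_nil_iff]
        intro y hy
        have := hl y hy
        simp only [beq_iff_eq]
        omega
      rw [hnil _ (by decide), hnil _ (by decide)]
  · intro t ht; revert ht; revert t; decide
  · decide
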